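-- pv_equiv track=rewrite | github.com/salaheddinemaimouni/VLSM-subneter | my_VLSM.py | binlistto4x8oct
-- ===== SOURCE A (Python) =====
-- def binlistto4x8oct(L): #list binaire to 8 octet dcml
--     x=[]
--     for i in range(0,32,8):
--     	n,j=0,0
--     	for e in L[i:i+8]:
--     		n=n+e*(2**(7-j))
--     		j=j+1
--     	x.append(n)
--     return x
-- ===== SOURCE B (Python) =====
-- def binlistto4x8oct(L):
--     x = [0, 0, 0, 0]
--     for k, e in enumerate(L[:32]):
--         x[k // 8] += e * 2 ** (7 - k % 8)
--     return x
-- ===== Notes on version B (the rewrite author's own statement) =====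
-- stated objective: alternative
-- what changed: B replaces A's two nested loops (outer over four slices, inner indexed weighted sum per slice) with one flat pass over the enumerated first 32 bits that scatters each bit's weighted contribution into a 4-slot accumulator table x[k//8], so no slicing and no inner loop exist.
import Mathlib
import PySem

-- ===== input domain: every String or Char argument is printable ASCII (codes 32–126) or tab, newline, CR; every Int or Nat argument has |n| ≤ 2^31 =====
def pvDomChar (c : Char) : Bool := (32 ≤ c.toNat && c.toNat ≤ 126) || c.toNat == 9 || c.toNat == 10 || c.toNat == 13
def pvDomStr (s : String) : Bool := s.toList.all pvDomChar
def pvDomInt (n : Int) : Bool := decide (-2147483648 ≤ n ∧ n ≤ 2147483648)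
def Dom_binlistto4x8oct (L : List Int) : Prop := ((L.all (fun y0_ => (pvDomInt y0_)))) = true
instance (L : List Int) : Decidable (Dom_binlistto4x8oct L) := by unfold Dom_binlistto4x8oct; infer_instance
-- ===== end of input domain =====

-- B replaces A's nested loops (outer over four 8-bit slices, inner weighted sum) with one flat
-- enumerated pass over the first 32 bits scattering into a 4-slot accumulator table (objective: alternative).

-- ===== PORT A =====
def binlistto4x8oct (L : List Int) : List Int :=
  (PySem.List.pyRange 0 32 8).foldl
    (fun x i =>
      let st := (PySem.List.slice L (some i) (some (i + 8))).foldl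
        (fun (p : Int × Int) e => (p.1 + e * (2 : Int) ^ (((7 : Int) - p.2).toNat), p.2 + 1))
        ((0 : Int), (0 : Int))
      x ++ [st.1])
    []

-- ===== PORT B =====
def binlistto4x8oct_alt (L : List Int) : List Int :=
  (PySem.List.enumerate (PySem.List.slice L none (some 32)) 0).foldl
    (fun x p =>
      x.modify (PySem.Int.floordiv p.1 8).toNat
        (fun v => v + p.2 * (2 : Int) ^ (((7 : Int) - PySem.Int.mod p.1 8).toNat)))
    [0, 0, 0, 0]

-- ===== PRECONDITION & SPEC =====
def Spec_binlistto4x8oct (L : List Int) (out : List Int) : Prop := out = binlistto4x8oct_alt L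
instance (L : List Int) (out : List Int) : Decidable (Spec_binlistto4x8oct L out) := by unfold Spec_binlistto4x8oct; infer_instance

-- ===== CLAIM (what is proved, stated in full; the proofs are below) =====
def Claim_equal_binlistto4x8oct : Prop := ∀ (L : List Int), Dom_binlistto4x8oct L → Spec_binlistto4x8oct L (binlistto4x8oct L)

-- ===== LEMMAS AND PROOFS =====

-- The weighted contribution of the bits of s (positions k, k+1, …) that land in bucket i.
def bktsum (i : Nat) : Nat → List Int → Int
  | _, [] => 0
  | k, e :: t => (if k / 8 = i then e * (2 : Int) ^ (7 - k % 8) else 0) + bktsum i (k + 1) t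

theorem bktsum_append (i : Nat) (s t : List Int) : ∀ (k : Nat),
    bktsum i k (s ++ t) = bktsum i k s + bktsum i (k + s.length) t := by
  induction s with
  | nil => intro k; simp [bktsum]
  | cons e s ih =>
    intro k
    simp only [List.cons_append, bktsum, ih (k + 1), List.length_cons,
      show k + 1 + s.length = k + (s.length + 1) by omega]
    ring

theorem bktsum_out (i : Nat) (s : List Int) : ∀ (k : Nat),
    (∀ m, m < s.length → (k + m) / 8 ≠ i) → bktsum i k s = 0 := by
  induction s with
  | nil => intro k _; simp [bktsum]
  | cons e s ih =>
    intro k h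
    have h0 : k / 8 ≠ i := by have := h 0 (by simp); simpa using this
    have h1 : ∀ m, m < s.length → (k + 1 + m) / 8 ≠ i := by
      intro m hm
      have := h (m + 1) (by simp; omega)
      rwa [show k + (m + 1) = k + 1 + m by omega] at this
    simp [bktsum, h0, ih (k + 1) h1]

-- A's inner indexed weighted fold over a chunk equals the bucket-i portion of bktsum at base 8*i.
theorem afold_eq (i : Nat) (c : List Int) : ∀ (j : Nat) (n : Int), j + c.length ≤ 8 →
    (c.foldl
      (fun (p : Int × Int) e => (p.1 + e * (2 : Int) ^ (((7 : Int) - p.2).toNat), p.2 + 1))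
      (n, (j : Int))).1
      = n + bktsum i (8 * i + j) c := by
  induction c with
  | nil => intro j n _; simp [bktsum]
  | cons e t ih =>
    intro j n h
    simp only [List.foldl_cons, List.length_cons] at *
    have h7 : ((7 : Int) - (j : Int)).toNat = 7 - j := by omega
    have hj : ((j : Int) + 1) = ((j + 1 : Nat) : Int) := by push_cast; ring
    rw [h7, hj, ih (j + 1) _ (by omega)]
    have hd : (8 * i + j) / 8 = i := by omega
    have hm : (8 * i + j) % 8 = j := by omega
    simp [bktsum, hd, hm, show 8 * i + j + 1 = 8 * i + (j + 1) from by omega]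
    ring

-- B's flat fold, characterised: each bucket gains the bktsum of the bits it owns.
theorem bfold_eq (s : List Int) : ∀ (k : Nat) (x0 x1 x2 x3 : Int), k + s.length ≤ 32 →
    (PySem.List.enumerate s (k : Int)).foldl
      (fun x p =>
        x.modify (PySem.Int.floordiv p.1 8).toNat
          (fun v => v + p.2 * (2 : Int) ^ (((7 : Int) - PySem.Int.mod p.1 8).toNat)))
      [x0, x1, x2, x3]
      = [x0 + bktsum 0 k s, x1 + bktsum 1 k s, x2 + bktsum 2 k s, x3 + bktsum 3 k s] := by
  induction s with
  | nil => intro k x0 x1 x2 x3 _; simp [PySem.List.enumerate, bktsum]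
  | cons e t ih =>
    intro k x0 x1 x2 x3 h
    simp only [List.length_cons] at h
    rw [PySem.List.enumerate_cons, List.foldl_cons]
    have hfd : PySem.Int.floordiv (k : Int) 8 = ((k / 8 : Nat) : Int) := by
      unfold PySem.Int.floordiv
      rw [Int.fdiv_eq_ediv_of_nonneg _ (by norm_num)]; omega
    have hmd : ((7 : Int) - PySem.Int.mod (k : Int) 8).toNat = 7 - k % 8 := by
      unfold PySem.Int.mod
      rw [Int.fmod_eq_emod_of_nonneg _ (by norm_num)]; omega
    have hk1 : (k : Int) + 1 = ((k + 1 : Nat) : Int) := by push_cast; ring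
    rw [hfd, hmd, hk1]
    have hcase : k / 8 = 0 ∨ k / 8 = 1 ∨ k / 8 = 2 ∨ k / 8 = 3 := by omega
    rcases hcase with hc | hc | hc | hc
    · rw [hc,
        show ([x0, x1, x2, x3].modify (((0 : Nat) : Int)).toNat
            (fun v => v + e * (2 : Int) ^ (7 - k % 8)))
          = [x0 + e * (2 : Int) ^ (7 - k % 8), x1, x2, x3] from rfl,
        ih (k + 1) _ _ _ _ (by omega)]
      simp [bktsum, hc]
      ring
    · rw [hc,
        show ([x0, x1, x2, x3].modify (((1 : Nat) : Int)).toNat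
            (fun v => v + e * (2 : Int) ^ (7 - k % 8)))
          = [x0, x1 + e * (2 : Int) ^ (7 - k % 8), x2, x3] from rfl,
        ih (k + 1) _ _ _ _ (by omega)]
      simp [bktsum, hc]
      ring
    · rw [hc,
        show ([x0, x1, x2, x3].modify (((2 : Nat) : Int)).toNat
            (fun v => v + e * (2 : Int) ^ (7 - k % 8)))
          = [x0, x1, x2 + e * (2 : Int) ^ (7 - k % 8), x3] from rfl,
        ih (k + 1) _ _ _ _ (by omega)]
      simp [bktsum, hc]
      ring
    · rw [hc,
        show ([x0, x1, x2, x3].modify (((3 : Nat) : Int)).toNat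
            (fun v => v + e * (2 : Int) ^ (7 - k % 8)))
          = [x0, x1, x2, x3 + e * (2 : Int) ^ (7 - k % 8)] from rfl,
        ih (k + 1) _ _ _ _ (by omega)]
      simp [bktsum, hc]
      ring

-- B's fold from the all-zero table at offset 0.
theorem bfold_zero (s : List Int) (h : s.length ≤ 32) :
    (PySem.List.enumerate s 0).foldl
      (fun x p =>
        x.modify (PySem.Int.floordiv p.1 8).toNat
          (fun v => v + p.2 * (2 : Int) ^ (((7 : Int) - PySem.Int.mod p.1 8).toNat)))
      [0, 0, 0, 0]
      = [bktsum 0 0 s, bktsum 1 0 s, bktsum 2 0 s, bktsum 3 0 s] := by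
  have := bfold_eq s 0 0 0 0 0 (by omega)
  simpa using this

-- A bucket collects nothing from a chunk based at another bucket's byte.
theorem bkt_vanish (i k : Nat) (s : List Int) (hs : s.length ≤ 8) (h8 : k % 8 = 0)
    (hki : k / 8 ≠ i) : bktsum i k s = 0 :=
  bktsum_out i s k (by intro m hm; omega)

-- The 32-bit window is the concatenation of the four 8-bit chunks.
theorem take32_split (L : List Int) :
    L.take 32 = ((L.take 8 ++ (L.drop 8).take 8) ++ (L.drop 16).take 8) ++ (L.drop 24).take 8 := by
  rw [show (32 : Nat) = 8 + 8 + 8 + 8 from rfl]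
  rw [List.take_add, List.take_add, List.take_add]

-- bktsum of the 32-bit window splits at the four chunk boundaries, and only chunk i survives for bucket i.
theorem bktsum_take32 (L : List Int) (i : Nat) (hi : i < 4) :
    bktsum i 0 (L.take 32) = bktsum i (8 * i) ((L.drop (8 * i)).take 8) := by
  rw [take32_split, bktsum_append, bktsum_append, bktsum_append]
  simp only [List.length_append, List.length_take, List.length_drop, Nat.zero_add]
  have e1 : bktsum i (min 8 L.length) ((L.drop 8).take 8) = bktsum i 8 ((L.drop 8).take 8) := by
    rcases Nat.lt_or_ge 8 L.length with h | h
    · congr 1; omega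
    · simp [List.drop_eq_nil_of_le h, bktsum]
  have e2 : bktsum i (min 8 L.length + min 8 (L.length - 8)) ((L.drop 16).take 8)
      = bktsum i 16 ((L.drop 16).take 8) := by
    rcases Nat.lt_or_ge 16 L.length with h | h
    · congr 1; omega
    · simp [List.drop_eq_nil_of_le h, bktsum]
  have e3 : bktsum i (min 8 L.length + min 8 (L.length - 8) + min 8 (L.length - 16)) ((L.drop 24).take 8)
      = bktsum i 24 ((L.drop 24).take 8) := by
    rcases Nat.lt_or_ge 24 L.length with h | h
    · congr 1; omega
    · simp [List.drop_eq_nil_of_le h, bktsum]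
  rw [e1, e2, e3]
  interval_cases i
  · rw [bkt_vanish 0 8 _ (by simp) (by norm_num) (by norm_num),
        bkt_vanish 0 16 _ (by simp) (by norm_num) (by norm_num),
        bkt_vanish 0 24 _ (by simp) (by norm_num) (by norm_num)]
    norm_num
  · rw [bkt_vanish 1 0 _ (by simp) (by norm_num) (by norm_num),
        bkt_vanish 1 16 _ (by simp) (by norm_num) (by norm_num),
        bkt_vanish 1 24 _ (by simp) (by norm_num) (by norm_num)]
    norm_num
  · rw [bkt_vanish 2 0 _ (by simp) (by norm_num) (by norm_num),
        bkt_vanish 2 8 _ (by simp) (by norm_num) (by norm_num),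
        bkt_vanish 2 24 _ (by simp) (by norm_num) (by norm_num)]
    norm_num
  · rw [bkt_vanish 3 0 _ (by simp) (by norm_num) (by norm_num),
        bkt_vanish 3 8 _ (by simp) (by norm_num) (by norm_num),
        bkt_vanish 3 16 _ (by simp) (by norm_num) (by norm_num)]
    norm_num

theorem pyRange_32_8 : PySem.List.pyRange 0 32 8 = [0, 8, 16, 24] := by decide

-- ===== VERDICT (by name: the statement is the Claim_ definition above) =====
theorem binlistto4x8oct_spec : Claim_equal_binlistto4x8oct := by
  intro L _
  unfold Spec_binlistto4x8oct binlistto4x8oct binlistto4x8oct_alt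
  rw [pyRange_32_8]
  simp only [List.foldl_cons, List.foldl_nil, List.nil_append]
  have s32 : PySem.List.slice L none (some 32) = L.take 32 := by
    rw [show (32 : Int) = ((32 : Nat) : Int) by norm_num, PySem.List.slice_to_natCast]
  have s0 : PySem.List.slice L (some 0) (some (0 + 8)) = (L.drop 0).take 8 := by
    rw [show ((0 : Int) + 8) = ((8 : Nat) : Int) by norm_num,
        show (0 : Int) = ((0 : Nat) : Int) from rfl, PySem.List.slice_natCast]
  have s8 : PySem.List.slice L (some 8) (some (8 + 8)) = (L.drop 8).take 8 := by
    rw [show ((8 : Int) + 8) = ((16 : Nat) : Int) by norm_num,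
        show (8 : Int) = ((8 : Nat) : Int) by norm_num, PySem.List.slice_natCast]
  have s16 : PySem.List.slice L (some 16) (some (16 + 8)) = (L.drop 16).take 8 := by
    rw [show ((16 : Int) + 8) = ((24 : Nat) : Int) by norm_num,
        show (16 : Int) = ((16 : Nat) : Int) by norm_num, PySem.List.slice_natCast]
  have s24 : PySem.List.slice L (some 24) (some (24 + 8)) = (L.drop 24).take 8 := by
    rw [show ((24 : Int) + 8) = ((32 : Nat) : Int) by norm_num,
        show (24 : Int) = ((24 : Nat) : Int) by norm_num, PySem.List.slice_natCast]
  rw [s32, s0, s8, s16, s24, bfold_zero _ (by simp)]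
  rw [bktsum_take32 L 0 (by omega), bktsum_take32 L 1 (by omega),
      bktsum_take32 L 2 (by omega), bktsum_take32 L 3 (by omega)]
  have A0 := afold_eq 0 ((L.drop (8 * 0)).take 8) 0 0 (by simp)
  have A1 := afold_eq 1 ((L.drop (8 * 1)).take 8) 0 0 (by simp)
  have A2 := afold_eq 2 ((L.drop (8 * 2)).take 8) 0 0 (by simp)
  have A3 := afold_eq 3 ((L.drop (8 * 3)).take 8) 0 0 (by simp)
  norm_num at A0 A1 A2 A3 ⊢
  exact ⟨A0, A1, A2, A3⟩
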